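-- pv_equiv track=rewrite | github.com/jasonhenline/project_euler | problem038/solution.py | is_concat_of_consecutive_multiples
-- ===== SOURCE A (Python) =====
-- def is_concat_of_consecutive_multiples(digits):
--     s = "".join(str(d) for d in digits)
--     for end in range(1, 9):
--         m = int(s[:end])
--         rest = s[end:]
--         n = 2
--         while True:
--             ss = str(m * n)
--             if rest.startswith(ss):
--                 rest = rest[len(ss) :]
--                 n += 1
--                 if not rest:
--                     return True
--             else:
--                 break
--     return False
-- ===== SOURCE B (Python) =====
-- def is_concat_of_consecutive_multiples(digits):
--     s = "".join(str(d) for d in digits)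
--     for end in range(1, 9):
--         m = int(s[:end])
--         concat = s[:end]
--         n = 2
--         while len(concat) < len(s):
--             concat += str(m * n)
--             n += 1
--         if concat == s and n > 2:
--             return True
--     return False
-- ===== Notes on version B (the rewrite author's own statement) =====
-- stated objective: simpler
-- what changed: B builds the full candidate concatenation s[:end] + str(2m) + str(3m) + ... once (stopping when it reaches len(s)) and compares it to s with a single equality test, instead of A's greedy loop that repeatedly tests startswith and strips the matched prefix off the remainder.
import Mathlib
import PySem

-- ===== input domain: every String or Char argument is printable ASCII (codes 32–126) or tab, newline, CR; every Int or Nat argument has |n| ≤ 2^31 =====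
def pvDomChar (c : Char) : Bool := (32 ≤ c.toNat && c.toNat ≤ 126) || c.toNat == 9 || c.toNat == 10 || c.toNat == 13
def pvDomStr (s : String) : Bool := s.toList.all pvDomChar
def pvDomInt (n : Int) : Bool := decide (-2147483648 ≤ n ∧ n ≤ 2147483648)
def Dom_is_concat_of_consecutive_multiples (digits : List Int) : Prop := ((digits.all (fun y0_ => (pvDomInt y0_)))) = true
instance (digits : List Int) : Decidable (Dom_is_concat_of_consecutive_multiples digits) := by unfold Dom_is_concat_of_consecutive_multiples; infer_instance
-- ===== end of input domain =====

-- B builds the whole concatenation s[:end] + str(2m) + str(3m) + … once and compares it with s,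
-- instead of A's greedy prefix-stripping; objective: simpler (one comparison, no slicing of the rest).

-- termination helper for both ports: str(n) is never the empty string
theorem pvToDigitsCore_ne_nil (b n f : Nat) (acc : List Char) (h : acc ≠ [] ∨ 0 < f) :
    Nat.toDigitsCore b f n acc ≠ [] := by
  induction f generalizing n acc with
  | zero =>
    simp [Nat.toDigitsCore]
    rcases h with h | h
    · exact h
    · omega
  | succ f ih =>
    simp [Nat.toDigitsCore]
    split
    · simp
    · exact ih _ _ (Or.inl (by simp))

theorem pvToChars_ne_nil (n : Int) : PySem.Int.toChars n ≠ [] := by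
  unfold PySem.Int.toChars
  split
  · simp
  · exact pvToDigitsCore_ne_nil 10 _ _ [] (Or.inr (by omega))

theorem pvToChars_length_pos (n : Int) : 0 < (PySem.Int.toChars n).length :=
  List.length_pos_iff.mpr (pvToChars_ne_nil n)

-- ===== PORT A =====
-- inner 'while True' loop of A: greedily strip str(m*n), str(m*(n+1)), … from rest
def pvInnerA (m n : Int) (rest : List Char) : Bool :=
  let ss := PySem.Int.toChars (m * n)          -- ss = str(m * n)
  if h1 : ss.isPrefixOf rest then              -- rest.startswith(ss)
    let rest' := rest.drop ss.length           -- rest = rest[len(ss):]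
    if rest' = [] then true                    -- if not rest: return True
    else pvInnerA m (n + 1) rest'
  else false                                   -- break
termination_by rest.length
decreasing_by
  have hpre : PySem.Int.toChars (m * n) <+: rest := List.isPrefixOf_iff_prefix.mp h1
  have hle := hpre.length_le
  have hpos := pvToChars_length_pos (m * n)
  simp only [List.length_drop]
  omega

-- for end in range(1, 9): …  (a matching end returns True; exhausted loop returns False)
def pvLoopA (s : List Char) : Bool :=
  (PySem.List.pyRange 1 9 1).any (fun e =>
    match PySem.Int.ofChars? (PySem.List.slice s none (some e)) with   -- m = int(s[:end])
    | none => false      -- Python raises ValueError here; excluded by Pre_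
    | some m => pvInnerA m 2 (PySem.List.slice s (some e) none))       -- rest = s[end:], n = 2

def is_concat_of_consecutive_multiples (digits : List Int) : Bool :=
  -- s = "".join(str(d) for d in digits)
  pvLoopA ((digits.map (fun d => PySem.Int.toChars d)).flatten)

-- ===== PORT B =====
-- inner 'while len(concat) < len(s)' loop of B: concat += str(m*n); n += 1
def pvBuildB (m n : Int) (concat : List Char) (slen : Nat) : List Char × Int :=
  if concat.length < slen then
    pvBuildB m (n + 1) (concat ++ PySem.Int.toChars (m * n)) slen
  else (concat, n)
termination_by slen - concat.length
decreasing_by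
  have hpos := pvToChars_length_pos (m * n)
  simp only [List.length_append]
  omega

def pvLoopB (s : List Char) : Bool :=
  (PySem.List.pyRange 1 9 1).any (fun e =>
    match PySem.Int.ofChars? (PySem.List.slice s none (some e)) with   -- m = int(s[:end])
    | none => false      -- Python raises ValueError here; excluded by Pre_
    | some m =>
      let p := pvBuildB m 2 (PySem.List.slice s none (some e)) s.length  -- concat = s[:end]; while …
      decide (p.1 = s ∧ 2 < p.2))                                        -- concat == s and n > 2

def is_concat_of_consecutive_multiples_alt (digits : List Int) : Bool :=
  pvLoopB ((digits.map (fun d => PySem.Int.toChars d)).flatten)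

-- ===== PRECONDITION & SPEC =====
-- Pre_ excludes exactly the inputs on which Python A raises ValueError at int(s[:end]):
-- the digit string is empty, or a '-' sign (from a negative list element) occurs among its
-- first min(8, len(s)) characters.  A returns normally on every other input.
def Pre_is_concat_of_consecutive_multiples (digits : List Int) : Prop :=
  let s := (digits.map (fun d => PySem.Int.toChars d)).flatten
  s ≠ [] ∧ (s.take 8).all (fun c => c.isDigit) = true
instance (digits : List Int) : Decidable (Pre_is_concat_of_consecutive_multiples digits) := by unfold Pre_is_concat_of_consecutive_multiples; infer_instance

def pvWitness_is_concat_of_consecutive_multiples : List Int := [1, 9, 2, 3, 8, 4]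

def Spec_is_concat_of_consecutive_multiples (digits : List Int) (out : Bool) : Prop := out = is_concat_of_consecutive_multiples_alt digits
instance (digits : List Int) (out : Bool) : Decidable (Spec_is_concat_of_consecutive_multiples digits out) := by unfold Spec_is_concat_of_consecutive_multiples; infer_instance

-- ===== CLAIM (what is proved, stated in full; the proofs are below) =====
def Claim_equal_is_concat_of_consecutive_multiples : Prop := ∀ (digits : List Int), Dom_is_concat_of_consecutive_multiples digits → Pre_is_concat_of_consecutive_multiples digits → Spec_is_concat_of_consecutive_multiples digits (is_concat_of_consecutive_multiples digits)

-- ===== LEMMAS AND PROOFS =====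

-- the built concatenation keeps its seed as a prefix
theorem pvBuildB_prefix (m n : Int) (concat : List Char) (slen : Nat) :
    concat <+: (pvBuildB m n concat slen).1 := by
  induction n, concat using pvBuildB.induct (m := m) (slen := slen) with
  | case1 n concat h ih =>
    rw [pvBuildB, if_pos h]
    exact (List.prefix_append _ _).trans ih
  | case2 n concat h =>
    rw [pvBuildB, if_neg h]

-- the final n is at least the starting n, and strictly larger if at least one append happened
theorem pvBuildB_snd_le (m n : Int) (concat : List Char) (slen : Nat) :
    n ≤ (pvBuildB m n concat slen).2 := by
  induction n, concat using pvBuildB.induct (m := m) (slen := slen) with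
  | case1 n concat h ih =>
    rw [pvBuildB, if_pos h]
    omega
  | case2 n concat h =>
    rw [pvBuildB, if_neg h]

theorem pvBuildB_snd_lt (m n : Int) (concat : List Char) (slen : Nat)
    (h : concat.length < slen) : n < (pvBuildB m n concat slen).2 := by
  rw [pvBuildB, if_pos h]
  have := pvBuildB_snd_le m (n + 1) (concat ++ PySem.Int.toChars (m * n)) slen
  omega

-- KEY LEMMA: A's greedy stripping of rest succeeds exactly when B's built concatenation,
-- seeded with the already-consumed prefix acc, ends up equal to s with at least one append.
theorem pvInner_eq_build (s : List Char) (m n : Int) (rest acc : List Char)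
    (hacc : acc ++ rest = s) :
      pvInnerA m n rest =
        decide ((pvBuildB m n acc s.length).1 = s ∧ n < (pvBuildB m n acc s.length).2) := by
  induction n, rest using pvInnerA.induct (m := m) generalizing acc with
  | case1 n rest ss h1 rest' h2 =>
    -- rest.startswith(ss) and the stripped rest is empty: A returns True
    have hd : rest' = List.drop ss.length rest := rfl
    have hss : ss = PySem.Int.toChars (m * n) := rfl
    clear_value ss rest'
    subst hd hss
    rw [pvInnerA, dif_pos h1, if_pos h2]
    have hpre : PySem.Int.toChars (m * n) <+: rest := List.isPrefixOf_iff_prefix.mp h1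
    have hrest := List.prefix_iff_eq_append.mp hpre
    rw [h2, List.append_nil] at hrest
    subst hrest
    have hsspos := pvToChars_length_pos (m * n)
    have hlt : acc.length < s.length := by rw [← hacc]; simp; omega
    rw [pvBuildB, if_pos hlt]
    rw [pvBuildB, if_neg (by rw [hacc]; omega)]
    simp [hacc]
  | case2 n rest ss h1 rest' h2 ih =>
    -- rest.startswith(ss), stripped rest nonempty: both sides take one step
    have hd : rest' = List.drop ss.length rest := rfl
    have hss : ss = PySem.Int.toChars (m * n) := rfl
    clear_value ss rest'
    subst hd hss
    rw [pvInnerA, dif_pos h1, if_neg h2]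
    have hpre : PySem.Int.toChars (m * n) <+: rest := List.isPrefixOf_iff_prefix.mp h1
    have hrest := List.prefix_iff_eq_append.mp hpre
    have hsspos := pvToChars_length_pos (m * n)
    have hlenr : (PySem.Int.toChars (m * n)).length ≤ rest.length := hpre.length_le
    have hlt : acc.length < s.length := by
      have h3 := congrArg List.length hacc
      simp at h3
      omega
    rw [pvBuildB, if_pos hlt]
    have hacc' : (acc ++ PySem.Int.toChars (m * n)) ++
        List.drop (PySem.Int.toChars (m * n)).length rest = s := by
      rw [List.append_assoc, hrest, hacc]
    rw [ih _ hacc']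
    -- the two decide conditions agree because the final n exceeds n + 1 here
    have hlt' : (acc ++ PySem.Int.toChars (m * n)).length < s.length := by
      have h3 : acc.length + (PySem.Int.toChars (m * n)).length
          + (List.drop (PySem.Int.toChars (m * n)).length rest).length = s.length := by
        rw [← hacc']; simp [List.length_append]; omega
      have h4 : (List.drop (PySem.Int.toChars (m * n)).length rest).length ≠ 0 :=
        fun h => h2 (List.eq_nil_of_length_eq_zero h)
      simp only [List.length_append]
      omega
    have := pvBuildB_snd_lt m (n + 1) (acc ++ PySem.Int.toChars (m * n)) s.length hlt'
    by_cases hq : (pvBuildB m (n + 1) (acc ++ PySem.Int.toChars (m * n)) s.length).1 = s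
    · simp [hq]
      omega
    · simp [hq]
  | case3 n rest ss h1 =>
    -- not a prefix: A breaks with False; B's result cannot equal s (or nothing was appended)
    have hss : ss = PySem.Int.toChars (m * n) := rfl
    clear_value ss
    subst hss
    rw [pvInnerA, dif_neg h1]
    by_cases h0 : acc.length < s.length
    · -- one append happens; its result has acc ++ ss as a prefix, but ss is not a prefix of rest
      rw [pvBuildB, if_pos h0]
      have hpref := pvBuildB_prefix m (n + 1) (acc ++ PySem.Int.toChars (m * n)) s.length
      have hne : (pvBuildB m (n + 1) (acc ++ PySem.Int.toChars (m * n)) s.length).1 ≠ s := by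
        intro he
        rw [he, ← hacc] at hpref
        exact h1 (List.isPrefixOf_iff_prefix.mpr ((List.prefix_append_right_inj acc).mp hpref))
      simp [hne]
    · -- no append: rest = [], B returns (acc, n) and n < n is false
      rw [pvBuildB, if_neg h0]
      simp

-- per-end agreement of the two loop bodies
theorem pvEnd_eq (s : List Char) (e : Int) :
    (match PySem.Int.ofChars? (PySem.List.slice s none (some e)) with
     | none => false
     | some m => pvInnerA m 2 (PySem.List.slice s (some e) none)) =
    (match PySem.Int.ofChars? (PySem.List.slice s none (some e)) with
     | none => false
     | some m =>
       let p := pvBuildB m 2 (PySem.List.slice s none (some e)) s.length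
       decide (p.1 = s ∧ 2 < p.2)) := by
  cases hm : PySem.Int.ofChars? (PySem.List.slice s none (some e)) with
  | none => rfl
  | some m =>
    simp only []
    by_cases he : 0 ≤ e
    · rw [PySem.List.slice_to s he, PySem.List.slice_from s he]
      exact pvInner_eq_build s m 2 (s.drop e.toNat) (s.take e.toNat) (List.take_append_drop _ _)
    · -- never reached from pyRange 1 9 1, but provable anyway: s[:e] = s.take (clamp), s[e:] likewise
      have h0 : PySem.List.slice s none (some e) = s.take (PySem.List.clampIdx s.length e) := by
        simp [PySem.List.slice]
      have h1 : PySem.List.slice s (some e) none = s.drop (PySem.List.clampIdx s.length e) := by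
        rw [PySem.List.slice_some_none]
      rw [h0, h1]
      exact pvInner_eq_build s m 2 _ _ (List.take_append_drop _ _)

-- ===== VERDICT (by name: the statement is the Claim_ definition above) =====
theorem is_concat_of_consecutive_multiples_spec : Claim_equal_is_concat_of_consecutive_multiples := by
  intro digits _ _
  unfold Spec_is_concat_of_consecutive_multiples
  unfold is_concat_of_consecutive_multiples is_concat_of_consecutive_multiples_alt
  unfold pvLoopA pvLoopB
  exact congrArg _ (funext (fun e => pvEnd_eq _ e))
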